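-- pv_equiv track=rewrite | github.com/Prasadkannawar/PharmaTrailX25 | src/nlp/nlp_engine.py | _classify_overall_severity
-- ===== SOURCE A (Python) =====
-- from typing import List, Dict, Any, Optional
--
-- def _classify_overall_severity(ae_events: List[Dict]) -> str:
--     """Classify overall severity based on individual events"""
--     if not ae_events:
--         return "none"
--
--     severities = [event.get('severity', 'mild') for event in ae_events]
--
--     if 'life-threatening' in severities:
--         return 'life-threatening'
--     elif 'severe' in severities:
--         return 'severe'
--     elif 'moderate' in severities:
--         return 'moderate'
--     else:
--         return 'mild'
-- ===== SOURCE B (Python) =====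
-- def _classify_overall_severity(ae_events):
--     """Classify overall severity via a rank table and one max-reduction pass."""
--     if not ae_events:
--         return "none"
--     rank = {'mild': 0, 'moderate': 1, 'severe': 2, 'life-threatening': 3}
--     label = {0: 'mild', 1: 'moderate', 2: 'severe', 3: 'life-threatening'}
--     top = 0
--     for event in ae_events:
--         top = max(top, rank.get(event.get('severity', 'mild'), 0))
--     return label.get(top, 'mild')
-- ===== Notes on version B (the rewrite author's own statement) =====
-- stated objective: simpler
-- what changed: Replaced the intermediate severities list plus up to four separate membership scans with a rank table and a single max-reduction pass, mapping the maximum rank back to its label.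
import Mathlib
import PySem

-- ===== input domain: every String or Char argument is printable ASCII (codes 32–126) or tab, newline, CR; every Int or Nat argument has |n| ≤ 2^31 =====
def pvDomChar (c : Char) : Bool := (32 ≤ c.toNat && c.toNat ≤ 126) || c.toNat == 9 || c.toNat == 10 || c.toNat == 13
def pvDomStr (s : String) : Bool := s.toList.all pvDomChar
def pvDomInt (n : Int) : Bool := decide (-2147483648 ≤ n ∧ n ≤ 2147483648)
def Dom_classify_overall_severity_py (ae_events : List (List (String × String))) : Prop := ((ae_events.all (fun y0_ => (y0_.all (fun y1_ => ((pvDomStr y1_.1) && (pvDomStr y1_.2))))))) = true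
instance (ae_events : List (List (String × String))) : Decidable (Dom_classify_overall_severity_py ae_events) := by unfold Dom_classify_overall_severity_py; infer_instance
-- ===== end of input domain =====

-- B replaces A's severities list and four membership scans by a rank table with one max-reduction pass (objective: simpler).


-- ===== PORT A =====
def classify_overall_severity_py (ae_events : List (List (String × String))) : String :=
  if ae_events = [] then "none"
  else
    let severities := ae_events.map (fun e => PySem.Dict.getD (PySem.Dict.mk e) "severity" "mild")
    if "life-threatening" ∈ severities then "life-threatening"
    else if "severe" ∈ severities then "severe"
    else if "moderate" ∈ severities then "moderate"
    else "mild"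

-- ===== PORT B =====
def pvRankB : PySem.Dict String Int :=
  PySem.Dict.mk [("mild", 0), ("moderate", 1), ("severe", 2), ("life-threatening", 3)]
def pvLabelB : PySem.Dict Int String :=
  PySem.Dict.mk [(0, "mild"), (1, "moderate"), (2, "severe"), (3, "life-threatening")]
def classify_overall_severity_py_alt (ae_events : List (List (String × String))) : String :=
  if ae_events = [] then "none"
  else
    let top := ae_events.foldl
      (fun t e => max t (PySem.Dict.getD pvRankB (PySem.Dict.getD (PySem.Dict.mk e) "severity" "mild") 0)) 0
    PySem.Dict.getD pvLabelB top "mild"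

-- ===== PRECONDITION & SPEC =====
def Spec_classify_overall_severity_py (ae_events : List (List (String × String))) (out : String) : Prop := out = classify_overall_severity_py_alt ae_events
instance (ae_events : List (List (String × String))) (out : String) : Decidable (Spec_classify_overall_severity_py ae_events out) := by unfold Spec_classify_overall_severity_py; infer_instance

-- ===== CLAIM (what is proved, stated in full; the proofs are below) =====
def Claim_equal_classify_overall_severity_py : Prop := ∀ (ae_events : List (List (String × String))), Dom_classify_overall_severity_py ae_events → Spec_classify_overall_severity_py ae_events (classify_overall_severity_py ae_events)

-- ===== LEMMAS AND PROOFS =====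

-- rank of a single severity string, as B computes it
def pvR (s : String) : Int := PySem.Dict.getD pvRankB s 0

lemma pvR_eq (s : String) :
    pvR s = if s = "life-threatening" then 3 else if s = "severe" then 2
            else if s = "moderate" then 1 else 0 := by
  by_cases h1 : s = "life-threatening"
  · subst h1; decide
  by_cases h2 : s = "severe"
  · subst h2; decide
  by_cases h3 : s = "moderate"
  · subst h3; decide
  by_cases h4 : s = "mild"
  · subst h4; decide
  have m1 : ("mild" == s) = false := beq_eq_false_iff_ne.mpr (Ne.symm h4)
  have m2 : ("moderate" == s) = false := beq_eq_false_iff_ne.mpr (Ne.symm h3)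
  have m3 : ("severe" == s) = false := beq_eq_false_iff_ne.mpr (Ne.symm h2)
  have m4 : ("life-threatening" == s) = false := beq_eq_false_iff_ne.mpr (Ne.symm h1)
  simp [pvR, pvRankB, PySem.Dict.getD, PySem.Dict.get?, List.find?, m1, m2, m3, m4, h1, h2, h3]

-- max-rank of a severities list, foldr form
def pvM (l : List String) : Int := l.foldr (fun s b => max (pvR s) b) 0

lemma pvM_nil : pvM [] = 0 := rfl

lemma pvM_cons (s : String) (l : List String) : pvM (s :: l) = max (pvR s) (pvM l) := rfl

lemma pvM_nonneg (l : List String) : 0 ≤ pvM l := by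
  induction l with
  | nil => simp [pvM]
  | cons s l ih => rw [pvM_cons]; omega

lemma pvM_closed (l : List String) :
    pvM l = if "life-threatening" ∈ l then 3 else if "severe" ∈ l then 2
            else if "moderate" ∈ l then 1 else 0 := by
  induction l with
  | nil => simp [pvM]
  | cons s l ih =>
    rw [pvM_cons, pvR_eq, ih]
    simp only [List.mem_cons, eq_comm]
    by_cases h1 : s = "life-threatening" <;> by_cases h2 : s = "severe" <;>
      by_cases h3 : s = "moderate" <;>
      by_cases m1 : "life-threatening" ∈ l <;> by_cases m2 : "severe" ∈ l <;>
      by_cases m3 : "moderate" ∈ l <;>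
      simp_all

lemma classify_eq_label (l : List String) :
    (if "life-threatening" ∈ l then "life-threatening"
     else if "severe" ∈ l then "severe"
     else if "moderate" ∈ l then "moderate" else "mild")
    = PySem.Dict.getD pvLabelB (pvM l) "mild" := by
  rw [pvM_closed]
  split_ifs <;> rfl

def pvSevOf (e : List (String × String)) : String := PySem.Dict.getD (PySem.Dict.mk e) "severity" "mild"

lemma fold_events (l : List (List (String × String))) (t : Int) (ht : 0 ≤ t) :
    l.foldl (fun t e => max t (pvR (pvSevOf e))) t = max t (pvM (l.map pvSevOf)) := by
  induction l generalizing t with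
  | nil => simp only [List.foldl, List.map, pvM_nil]; omega
  | cons e l ih =>
    rw [List.foldl_cons, List.map_cons, pvM_cons,
        ih (max t (pvR (pvSevOf e))) (le_trans ht (le_max_left _ _))]
    omega

-- ===== VERDICT (by name: the statement is the Claim_ definition above) =====
theorem classify_overall_severity_py_spec : Claim_equal_classify_overall_severity_py := by
  intro ae_events _
  unfold Spec_classify_overall_severity_py classify_overall_severity_py classify_overall_severity_py_alt
  by_cases h : ae_events = []
  · simp [h]
  · simp only [h, if_false]
    have hfold : ae_events.foldl
        (fun t e => max t (PySem.Dict.getD pvRankB (PySem.Dict.getD (PySem.Dict.mk e) "severity" "mild") 0)) 0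
        = pvM (ae_events.map (fun e => PySem.Dict.getD (PySem.Dict.mk e) "severity" "mild")) := by
      have h1 := fold_events ae_events 0 (le_refl 0)
      have h2 := pvM_nonneg (ae_events.map pvSevOf)
      rw [max_eq_right h2] at h1
      exact h1
    rw [hfold, classify_eq_label]
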